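-- pv_equiv track=rewrite | github.com/Tsujistencia/P3VS_codes | p3vs_ver9_new.py | edge_merge
-- ===== SOURCE A (Python) =====
-- def edge_merge(data):
--     result = {}
--
--     for key, value in data:
--         normalized_key = tuple(sorted(key))
--         if normalized_key in result:
--             result[normalized_key] += value
--         else:
--             result[normalized_key] = value
--
--     return result
-- ===== SOURCE B (Python) =====
-- def edge_merge(data):
--     # Normalize all keys up front, then build the result per distinct key
--     # (first-appearance order) by summing its matching values in one
--     # comprehension, instead of mutating a running accumulator dict.
--     pairs = [((min(k), max(k)), v) for k, v in data]
--     return {nk: sum(v for k2, v in pairs if k2 == nk)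
--             for nk in dict.fromkeys(k2 for k2, _ in pairs)}
-- ===== Notes on version B (the rewrite author's own statement) =====
-- stated objective: alternative
-- what changed: Replaces A's single-pass mutable dict accumulation with a map-normalize / dedup-keys / per-key filter-and-sum comprehension (no running accumulator); same first-appearance key order.
import Mathlib
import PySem

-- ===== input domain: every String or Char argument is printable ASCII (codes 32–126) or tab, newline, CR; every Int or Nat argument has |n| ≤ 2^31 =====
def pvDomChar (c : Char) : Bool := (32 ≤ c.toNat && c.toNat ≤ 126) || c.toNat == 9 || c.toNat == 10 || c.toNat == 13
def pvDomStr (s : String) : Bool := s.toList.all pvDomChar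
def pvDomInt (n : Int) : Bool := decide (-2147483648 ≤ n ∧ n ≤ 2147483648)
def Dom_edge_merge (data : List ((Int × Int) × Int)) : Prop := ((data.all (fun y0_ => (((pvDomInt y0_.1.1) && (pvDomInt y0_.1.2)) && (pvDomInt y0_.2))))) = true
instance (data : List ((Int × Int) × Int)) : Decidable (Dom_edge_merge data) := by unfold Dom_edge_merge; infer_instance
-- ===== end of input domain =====

-- B replaces A's single-pass mutable dict accumulation with normalize-all / dedup
-- keys / per-key filter-and-sum; same return value (a dict flattened to triples).

-- ===== PORT A =====
-- tuple(sorted(key)) on a 2-tuple of ints, written out on the pair (exact: sorting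
-- a two-element list keeps it if already ordered, else swaps).
def normSorted (k : Int × Int) : Int × Int := if k.1 ≤ k.2 then (k.1, k.2) else (k.2, k.1)

def edge_merge (data : List ((Int × Int) × Int)) : List (Int × Int × Int) :=
  let result := data.foldl
    (fun (r : PySem.Dict (Int × Int) Int) kv =>
      let nk := normSorted kv.1
      if r.contains nk then r.insert nk (r.getD nk 0 + kv.2)
      else r.insert nk kv.2)
    PySem.Dict.empty
  result.items.map (fun p => (p.1.1, p.1.2, p.2))

-- ===== PORT B =====
def edge_merge_alt (data : List ((Int × Int) × Int)) : List (Int × Int × Int) :=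
  let pairs := data.map (fun kv => ((min kv.1.1 kv.1.2, max kv.1.1 kv.1.2), kv.2))
  (PySem.List.dedup (pairs.map (fun p => p.1))).map
    (fun k => (k.1, k.2, (pairs.filter (fun p => p.1 == k)).foldl (fun s p => s + p.2) 0))

-- ===== PRECONDITION & SPEC =====
def Spec_edge_merge (data : List ((Int × Int) × Int)) (out : List (Int × Int × Int)) : Prop := out = edge_merge_alt data
instance (data : List ((Int × Int) × Int)) (out : List (Int × Int × Int)) : Decidable (Spec_edge_merge data out) := by unfold Spec_edge_merge; infer_instance

-- ===== CLAIM (what is proved, stated in full; the proofs are below) =====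
def Claim_equal_edge_merge : Prop := ∀ (data : List ((Int × Int) × Int)), Dom_edge_merge data → Spec_edge_merge data (edge_merge data)

-- ===== LEMMAS AND PROOFS =====

theorem norm_minmax (k : Int × Int) : normSorted k = (min k.1 k.2, max k.1 k.2) := by
  rcases k with ⟨a, b⟩
  simp only [normSorted, min_def, max_def]
  split <;> rfl

-- A's loop body always inserts the running total at the normalized key.
theorem stepA_eq (r : PySem.Dict (Int × Int) Int) (kv : (Int × Int) × Int) :
    (let nk := normSorted kv.1
     if r.contains nk then r.insert nk (r.getD nk 0 + kv.2)
     else r.insert nk kv.2)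
    = r.insert (normSorted kv.1) (r.getD (normSorted kv.1) 0 + kv.2) := by
  by_cases h : r.contains (normSorted kv.1) = true
  · simp [h]
  · simp only [Bool.not_eq_true] at h
    simp [h, PySem.Dict.getD_of_not_contains _ _ h]

theorem foldl_add_shift (l : List ((Int × Int) × Int)) (a : Int) :
    l.foldl (fun s p => s + p.2) a = a + l.foldl (fun s p => s + p.2) 0 := by
  induction l generalizing a with
  | nil => simp
  | cons p rest ih => simp only [List.foldl_cons]; rw [ih, ih (0 + p.2)]; ring

theorem getD_fold (l : List ((Int × Int) × Int)) (d : PySem.Dict (Int × Int) Int) (k : Int × Int) :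
    (l.foldl (fun d kv => d.insert (normSorted kv.1) (d.getD (normSorted kv.1) 0 + kv.2)) d).getD k 0
    = d.getD k 0 + (l.filter (fun kv => normSorted kv.1 == k)).foldl (fun s p => s + p.2) 0 := by
  induction l generalizing d with
  | nil => simp
  | cons kv rest ih =>
    simp only [List.foldl_cons, List.filter_cons]
    rw [ih]
    by_cases h : normSorted kv.1 = k
    · simp only [h, beq_self_eq_true, if_pos, List.foldl_cons,
        PySem.Dict.getD_insert_self]
      rw [foldl_add_shift _ (0 + kv.2)]
      ring
    · have hb : (normSorted kv.1 == k) = false := by simpa using h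
      rw [PySem.Dict.getD_insert_of_ne _ _ _ (fun he => h he.symm)]
      simp [hb]

theorem edge_merge_eq (data : List ((Int × Int) × Int)) :
    edge_merge data = edge_merge_alt data := by
  simp only [edge_merge, edge_merge_alt]
  have hstep : (fun (r : PySem.Dict (Int × Int) Int) (kv : (Int × Int) × Int) =>
      let nk := normSorted kv.1
      if r.contains nk then r.insert nk (r.getD nk 0 + kv.2)
      else r.insert nk kv.2)
      = fun r kv => r.insert (normSorted kv.1) (r.getD (normSorted kv.1) 0 + kv.2) := by
    funext r kv; exact stepA_eq r kv
  rw [hstep]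
  set d := data.foldl (fun r kv => r.insert (normSorted kv.1) (r.getD (normSorted kv.1) 0 + kv.2)) PySem.Dict.empty with hd
  have hnodup : d.keys.Nodup := by
    rw [hd]
    exact PySem.Dict.nodup_keys_foldl_insert_key data (fun kv => normSorted kv.1) _ _
      (by simp)
  have hkeys : d.keys = PySem.List.dedup (data.map (fun kv => normSorted kv.1)) := by
    rw [hd, PySem.Dict.keys_foldl_insert_key, PySem.Dict.keys_empty,
      PySem.Set.update_nil_left]
    simp
  rw [PySem.Dict.items_eq_map_keys d hnodup 0, hkeys]
  -- normalize B's side: pairs.map fst and pairs.filter/foldl in terms of data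
  have hmapfst : (data.map (fun kv => ((min kv.1.1 kv.1.2, max kv.1.1 kv.1.2), kv.2))).map (fun p => p.1)
      = data.map (fun kv => normSorted kv.1) := by
    simp only [List.map_map]
    exact List.map_congr_left (fun kv _ => by simp [norm_minmax])
  rw [hmapfst, List.map_map]
  apply List.map_congr_left
  intro k _
  have hgd : d.getD k 0 = (data.filter (fun kv => normSorted kv.1 == k)).foldl (fun s p => s + p.2) 0 := by
    rw [hd, getD_fold]; simp
  have hfil : (data.map (fun kv => ((min kv.1.1 kv.1.2, max kv.1.1 kv.1.2), kv.2))).filter (fun p => p.1 == k)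
      = (data.filter (fun kv => normSorted kv.1 == k)).map (fun kv => ((min kv.1.1 kv.1.2, max kv.1.1 kv.1.2), kv.2)) := by
    rw [List.filter_map]
    congr 1
    apply List.filter_congr
    intro kv _
    simp [norm_minmax]
  simp only [Function.comp, hfil, List.foldl_map, hgd]

-- ===== VERDICT (by name: the statement is the Claim_ definition above) =====
theorem edge_merge_spec : Claim_equal_edge_merge := by
  intro data _
  unfold Spec_edge_merge
  exact edge_merge_eq data
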